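-- pv_equiv track=rewrite | github.com/leftyscoobers/advent2020 | problems/07_problem.py | count_from_path
-- ===== SOURCE A (Python) =====
-- def count_from_path(path):
--     mult = 1
--     total_bags = 0
--     for n in [p[0] for p in path]:
--         if n > 0:
--             total_bags += mult * n
--             mult *= n
--     return total_bags
-- ===== SOURCE B (Python) =====
-- def count_from_path(path):
--     # Horner's rule evaluated right-to-left: the sum of prefix products of the
--     # positive heads equals v1*(1 + v2*(1 + ... vk*(1 + 0))), so traverse the
--     # path backwards folding total -> v*(1 + total); no running product needed.
--     total = 0
--     for p in reversed(path):
--         if p[0] > 0: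
--             total = p[0] * (1 + total)
--     return total
-- ===== Notes on version B (the rewrite author's own statement) =====
-- stated objective: alternative
-- what changed: Replaces A's forward loop carrying a running multiplier and an accumulator with a backwards (right-to-left) Horner traversal total -> p[0]*(1+total) over the reversed path, using the identity that the sum of prefix products factors into nested Horner form; no running product is maintained.
import Mathlib
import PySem

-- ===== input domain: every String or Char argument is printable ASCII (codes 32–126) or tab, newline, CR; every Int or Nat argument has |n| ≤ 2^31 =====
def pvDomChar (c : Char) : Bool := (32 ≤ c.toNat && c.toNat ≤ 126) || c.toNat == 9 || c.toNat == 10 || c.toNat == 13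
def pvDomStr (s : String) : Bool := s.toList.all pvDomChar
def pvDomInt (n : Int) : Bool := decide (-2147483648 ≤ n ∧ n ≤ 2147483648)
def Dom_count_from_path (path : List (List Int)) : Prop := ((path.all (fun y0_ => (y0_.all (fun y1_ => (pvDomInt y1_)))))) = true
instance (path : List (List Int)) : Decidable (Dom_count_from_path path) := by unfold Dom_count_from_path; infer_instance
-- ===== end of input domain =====

-- B replaces A's forward running-multiplier loop with a backwards Horner traversal total -> p[0]*(1+total) over the reversed path (alternative decomposition, same cost).


-- ===== PORT A =====
-- p[0]: under Pre_ every inner list is nonempty, so pyGet? is some; .getD 0 is never reached inside Pre_.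
def pvHead (p : List Int) : Int := (PySem.List.pyGet? p 0).getD 0

def count_from_path (path : List (List Int)) : Int :=
  (((path.map pvHead).foldl
      (fun (st : Int × Int) n =>
        if n > 0 then (st.1 * n, st.2 + st.1 * n) else st)
      (1, 0))).2

-- ===== PORT B =====
-- for p in reversed(path): if p[0] > 0: total = p[0] * (1 + total)
def count_from_path_alt (path : List (List Int)) : Int :=
  path.reverse.foldl
    (fun total p => if pvHead p > 0 then pvHead p * (1 + total) else total)
    0

-- ===== PRECONDITION & SPEC =====
-- Pre_ excludes inputs containing an empty inner list, on which Python A raises IndexError at p[0].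
def Pre_count_from_path (path : List (List Int)) : Prop := ∀ p ∈ path, p ≠ []
instance (path : List (List Int)) : Decidable (Pre_count_from_path path) := by unfold Pre_count_from_path; infer_instance
def pvWitness_count_from_path : List (List Int) := [[2, 7], [-1], [3]]
def Spec_count_from_path (path : List (List Int)) (out : Int) : Prop := out = count_from_path_alt path
instance (path : List (List Int)) (out : Int) : Decidable (Spec_count_from_path path out) := by unfold Spec_count_from_path; infer_instance

-- ===== CLAIM (what is proved, stated in full; the proofs are below) =====
def Claim_equal_count_from_path : Prop := ∀ (path : List (List Int)), Dom_count_from_path path → Pre_count_from_path path → Spec_count_from_path path (count_from_path path)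

-- ===== LEMMAS AND PROOFS =====

-- Horner form of the result, the bridge between the two traversals.
def pvHorner : List Int → Int
  | [] => 0
  | v :: vs => v * (1 + pvHorner vs)

-- B's backwards loop computes the Horner value of the filtered positive heads.
theorem alt_eq_horner (path : List (List Int)) :
    count_from_path_alt path = pvHorner ((path.map pvHead).filter (fun n => decide (n > 0))) := by
  unfold count_from_path_alt
  rw [List.foldl_reverse]
  induction path with
  | nil => rfl
  | cons p ps ih =>
    by_cases hp : pvHead p > 0
    · simp [List.foldr_cons, hp, ih, pvHorner]
    · simp [List.foldr_cons, hp, ih]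

-- A's step as a named function.
def pvStep (st : Int × Int) (n : Int) : Int × Int :=
  if n > 0 then (st.1 * n, st.2 + st.1 * n) else st

-- Skipping non-positive elements = folding over the filtered list.
theorem foldl_step_filter (hs : List Int) (st : Int × Int) :
    hs.foldl pvStep st = (hs.filter (fun n => decide (n > 0))).foldl pvStep st := by
  induction hs generalizing st with
  | nil => rfl
  | cons h t ih =>
    by_cases hp : h > 0
    · simp [hp, List.foldl_cons, ih]
    · simp [hp, List.foldl_cons, ih, pvStep]

-- Invariant: A's fold over an all-positive list from (m, t) yields t + m * horner.
theorem fold_eq_horner (vs : List Int) (m t : Int) (hpos : ∀ v ∈ vs, v > 0) :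
    (vs.foldl pvStep (m, t)).2 = t + m * pvHorner vs := by
  induction vs generalizing m t with
  | nil => simp [pvHorner]
  | cons v vs ih =>
    have hv : v > 0 := hpos v (by simp)
    have ih' := ih (m * v) (t + m * v) (fun w hw => hpos w (by simp [hw]))
    simp only [List.foldl_cons, pvStep, if_pos hv]
    rw [ih', pvHorner]
    ring

-- ===== VERDICT (by name: the statement is the Claim_ definition above) =====
theorem count_from_path_spec : Claim_equal_count_from_path := by
  intro path _ _
  unfold Spec_count_from_path count_from_path
  rw [alt_eq_horner]
  rw [show (fun (st : Int × Int) n => if n > 0 then (st.1 * n, st.2 + st.1 * n) else st) = pvStep from rfl]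
  rw [foldl_step_filter]
  have hpos : ∀ w ∈ (path.map pvHead).filter (fun n => decide (n > 0)), w > 0 := by
    intro w hw
    simpa using List.of_mem_filter hw
  rw [fold_eq_horner _ 1 0 hpos]
  ring
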